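-- pv_equiv track=rewrite | github.com/awais-124/ICPC | Python/queue-stack.py | generate_numbers_with_digits
-- ===== SOURCE A (Python) =====
-- def generate_numbers_with_digits(n, digits):
--     """Generate first n numbers using only given digits"""
--     from collections import deque
--
--     queue = deque(digits)
--     result = []
--
--     while queue and len(result) < n:
--         num = queue.popleft()
--         result.append(num)
--
--         for digit in digits:
--             next_num = num * 10 + digit
--             if len(str(next_num)) <= len(str(num)) + 1:
--                 queue.append(next_num)
--
--     return result[:n]
-- ===== SOURCE B (Python) =====
-- def generate_numbers_with_digits(n, digits):
--     """Generate first n numbers using only given digits, level by level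
--     (no deque: each BFS level is built wholesale with a comprehension;
--     a level is first trimmed to the numbers still needed)."""
--     result = []
--     level = list(digits)
--     while level and len(result) < n:
--         level = level[:n - len(result)]
--         result.extend(level)
--         level = [num * 10 + d for num in level for d in digits
--                  if len(str(num * 10 + d)) <= len(str(num)) + 1]
--     return result
-- ===== Notes on version B (the rewrite author's own statement) =====
-- stated objective: alternative
-- what changed: Replaces the deque-based BFS (pop one number, push its children, stop mid-level when n results are collected) by level-wise generation: the whole current level is appended to the result at once and the next level is built with a single comprehension, then the result is truncated to n.
import Mathlib
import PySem

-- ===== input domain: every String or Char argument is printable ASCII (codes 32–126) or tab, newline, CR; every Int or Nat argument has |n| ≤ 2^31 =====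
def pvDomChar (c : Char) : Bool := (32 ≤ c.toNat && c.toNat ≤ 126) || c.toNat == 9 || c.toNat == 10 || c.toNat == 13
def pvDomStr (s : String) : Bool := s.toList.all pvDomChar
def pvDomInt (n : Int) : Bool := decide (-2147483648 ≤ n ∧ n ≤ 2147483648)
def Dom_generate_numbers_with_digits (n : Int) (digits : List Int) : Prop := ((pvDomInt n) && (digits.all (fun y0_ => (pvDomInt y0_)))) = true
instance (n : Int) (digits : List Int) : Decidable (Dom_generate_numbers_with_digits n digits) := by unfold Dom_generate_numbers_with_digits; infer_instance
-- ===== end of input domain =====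

-- B replaces A's one-number-at-a-time deque BFS by level-wise generation (return value only).

-- ===== PORT A =====
-- 'len(str(num*10+digit)) <= len(str(num)) + 1' (this test appears verbatim in both Pythons)
def pvKeep (num d : Int) : Bool :=
  decide (PySem.Str.len (PySem.Int.toStr (num * 10 + d)) ≤ PySem.Str.len (PySem.Int.toStr num) + 1)

-- the while loop of A: pop one number, append it, push its surviving children
def generate_numbers_with_digits_go (n : Int) (digits queue result : List Int) : List Int :=
  match queue with
  | [] => result
  | num :: rest =>
    if _h : (result.length : Int) < n then
      generate_numbers_with_digits_go n digits
        (digits.foldl (fun q d => if pvKeep num d then q ++ [num * 10 + d] else q) rest)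
        (result ++ [num])
    else result
termination_by (n - result.length).toNat
decreasing_by simp; omega

def generate_numbers_with_digits (n : Int) (digits : List Int) : List Int :=
  PySem.List.slice (generate_numbers_with_digits_go n digits digits []) none (some n)

-- ===== PORT B =====
-- the comprehension '[num*10+d for num in level for d in digits if …]'
def pvNextLevel (digits level : List Int) : List Int :=
  level.flatMap (fun num =>
    digits.filterMap (fun d => if pvKeep num d then some (num * 10 + d) else none))

-- B's while loop: trim the level to the numbers still needed, append it whole,
-- then build the next level
-- ('level[:n - len(result)]' is written out at both of its uses)
def generate_numbers_with_digits_alt_go (n : Int) (digits level result : List Int) : List Int :=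
  if h : level ≠ [] ∧ (result.length : Int) < n then
    generate_numbers_with_digits_alt_go n digits
      (pvNextLevel digits (PySem.List.slice level none (some (n - result.length))))
      (result ++ PySem.List.slice level none (some (n - result.length)))
  else result
termination_by (n - result.length).toNat
decreasing_by
  have h1 : PySem.List.slice level none (some (n - (result.length : Int))) =
      level.take (n - (result.length : Int)).toNat :=
    PySem.List.slice_to level (by omega)
  have h2 : level.length ≠ 0 := fun hl => h.1 (List.eq_nil_of_length_eq_zero hl)
  rw [h1]
  simp only [List.length_append, List.length_take]
  omega

def generate_numbers_with_digits_alt (n : Int) (digits : List Int) : List Int :=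
  generate_numbers_with_digits_alt_go n digits digits []

-- ===== PRECONDITION & SPEC =====
def Spec_generate_numbers_with_digits (n : Int) (digits : List Int) (out : List Int) : Prop := out = generate_numbers_with_digits_alt n digits
instance (n : Int) (digits : List Int) (out : List Int) : Decidable (Spec_generate_numbers_with_digits n digits out) := by unfold Spec_generate_numbers_with_digits; infer_instance

-- ===== CLAIM (what is proved, stated in full; the proofs are below) =====
def Claim_equal_generate_numbers_with_digits : Prop := ∀ (n : Int) (digits : List Int), Dom_generate_numbers_with_digits n digits → Spec_generate_numbers_with_digits n digits (generate_numbers_with_digits n digits)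

-- ===== LEMMAS AND PROOFS =====

-- A's inner for-loop is 'append the surviving children of num'
theorem pvChildren_foldl (digits : List Int) (num : Int) (q : List Int) :
    digits.foldl (fun q d => if pvKeep num d then q ++ [num * 10 + d] else q) q
      = q ++ digits.filterMap (fun d => if pvKeep num d then some (num * 10 + d) else none) := by
  induction digits generalizing q with
  | nil => simp
  | cons d ds ih =>
    simp only [List.foldl_cons, List.filterMap_cons]
    by_cases h : pvKeep num d <;> simp [h, ih, List.append_assoc]

-- A's loop returns the result unchanged once it fills the budget
theorem pvA_stop (n : Int) (digits q result : List Int) (h : ¬ (result.length : Int) < n) :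
    generate_numbers_with_digits_go n digits q result = result := by
  rw [generate_numbers_with_digits_go.eq_def]
  cases q with
  | nil => rfl
  | cons a l => simp [h]

-- A processes a whole level 'lvl' (with 'ks' already queued behind it): if the level fits
-- in the budget all of it is consumed and its children are queued; otherwise A stops
-- mid-level, returning exactly the first n - |result| numbers of the level.
theorem pvA_level (n : Int) (digits : List Int) (lvl : List Int) :
    ∀ ks result : List Int,
      generate_numbers_with_digits_go n digits (lvl ++ ks) result =
        if (result.length + lvl.length : Int) ≤ n then
          generate_numbers_with_digits_go n digits (ks ++ pvNextLevel digits lvl) (result ++ lvl)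
        else result ++ lvl.take (n - result.length).toNat := by
  induction lvl with
  | nil =>
    intro ks result
    by_cases hle : (result.length : Int) ≤ n
    · simp [pvNextLevel, hle]
    · simp only [List.length_nil, List.nil_append, List.take_nil, List.append_nil]
      rw [if_neg (by omega), pvA_stop n digits ks result (by omega)]
  | cons num rest ih =>
    intro ks result
    rw [List.cons_append, generate_numbers_with_digits_go]
    by_cases hlt : (result.length : Int) < n
    · rw [dif_pos hlt, pvChildren_foldl, List.append_assoc, ih]
      have hlen : (((result ++ [num]).length : Int)) = result.length + 1 := by
        simp
      by_cases hfit : (result.length + ((num :: rest).length : Int)) ≤ n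
      · rw [if_pos (by rw [hlen]; simp only [List.length_cons] at hfit; push_cast at hfit ⊢; omega),
           if_pos hfit]
        simp [pvNextLevel, List.append_assoc]
      · rw [if_neg (by rw [hlen]; simp only [List.length_cons] at hfit; push_cast at hfit ⊢; omega),
           if_neg hfit]
        have hk : (n - (result.length + 1)).toNat + 1 = ((n : Int) - result.length).toNat := by
          omega
        rw [hlen]
        simp only [List.append_assoc, List.singleton_append]
        rw [← hk, List.take_succ_cons]
    · rw [dif_neg hlt,
         if_neg (by simp only [List.length_cons]; push_cast; omega)]
      have h0 : ((n : Int) - result.length).toNat = 0 := by omega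
      simp [h0]

-- when the result already fills the budget, B's loop returns it unchanged
theorem pvB_stop (n : Int) (digits level result : List Int) (h : ¬ (result.length : Int) < n) :
    generate_numbers_with_digits_alt_go n digits level result = result := by
  rw [generate_numbers_with_digits_alt_go]
  simp [h]

-- main induction (on a bound for the remaining budget): the two loops agree
theorem pvMain (n : Int) (digits : List Int) :
    ∀ (k : Nat) (lvl result : List Int), (n - result.length).toNat ≤ k →
      (result.length : Int) ≤ n →
      generate_numbers_with_digits_go n digits lvl result =
      generate_numbers_with_digits_alt_go n digits lvl result := by
  intro k
  induction k with
  | zero =>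
    intro lvl result hk hle
    have hstop : ¬ (result.length : Int) < n := by omega
    rw [pvA_stop n digits lvl result hstop, pvB_stop n digits lvl result hstop]
  | succ k ih =>
    intro lvl result hk hle
    cases lvl with
    | nil =>
      rw [generate_numbers_with_digits_go, generate_numbers_with_digits_alt_go]
      simp
    | cons num rest =>
      by_cases hlt : (result.length : Int) < n
      · rw [generate_numbers_with_digits_alt_go, dif_pos ⟨List.cons_ne_nil num rest, hlt⟩]
        rw [PySem.List.slice_to (num :: rest) (by omega)]
        have hA := pvA_level n digits (num :: rest) [] result
        simp only [List.append_nil, List.nil_append] at hA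
        by_cases hfit : (result.length + ((num :: rest).length : Int)) ≤ n
        · have hfit' : (result.length : Int) + (rest.length : Int) + 1 ≤ n := by
            simp only [List.length_cons] at hfit
            push_cast at hfit
            omega
          have htake : (num :: rest).take ((n : Int) - result.length).toNat = num :: rest :=
            List.take_of_length_le (by simp only [List.length_cons]; omega)
          rw [htake, hA, if_pos hfit]
          exact ih (pvNextLevel digits (num :: rest)) (result ++ (num :: rest))
            (by simp only [List.length_append, List.length_cons]; push_cast; omega)
            (by simp only [List.length_append, List.length_cons]; push_cast; omega)
        · rw [hA, if_neg hfit]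
          have hlenfull : ((result ++ (num :: rest).take ((n : Int) - result.length).toNat).length : Int) = n := by
            simp only [List.length_append, List.length_take, List.length_cons]
            simp only [List.length_cons] at hfit
            push_cast at hfit ⊢
            omega
          rw [pvB_stop n digits _ _ (by omega)]
      · rw [pvA_stop n digits _ result hlt, pvB_stop n digits _ result hlt]

-- B's loop never produces more than n numbers
theorem pvB_len (n : Int) (digits : List Int) :
    ∀ (k : Nat) (level result : List Int), (n - result.length).toNat ≤ k →
      (result.length : Int) ≤ n →
      ((generate_numbers_with_digits_alt_go n digits level result).length : Int) ≤ n := by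
  intro k
  induction k with
  | zero =>
    intro level result hk hle
    rw [pvB_stop n digits level result (by omega)]
    exact hle
  | succ k ih =>
    intro level result hk hle
    rw [generate_numbers_with_digits_alt_go]
    by_cases h : level ≠ [] ∧ (result.length : Int) < n
    · rw [dif_pos h, PySem.List.slice_to level (by omega)]
      have hlev : level.length ≠ 0 := fun hl => h.1 (List.eq_nil_of_length_eq_zero hl)
      apply ih
      · simp only [List.length_append, List.length_take]
        omega
      · simp only [List.length_append, List.length_take]
        push_cast
        omega
    · rw [dif_neg h]
      exact hle

-- ===== VERDICT (by name: the statement is the Claim_ definition above) =====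
theorem generate_numbers_with_digits_spec : Claim_equal_generate_numbers_with_digits := by
  intro n digits _
  unfold Spec_generate_numbers_with_digits generate_numbers_with_digits generate_numbers_with_digits_alt
  by_cases hn : 0 ≤ n
  · rw [pvMain n digits n.toNat digits [] (by simp) (by simpa using hn),
        PySem.List.slice_to _ hn]
    refine List.take_of_length_le ?_
    have hb := pvB_len n digits n.toNat digits [] (by simp) (by simpa using hn)
    omega
  · have hz : generate_numbers_with_digits_go n digits digits [] = [] :=
      pvA_stop n digits digits [] (by simp; omega)
    have hz' : generate_numbers_with_digits_alt_go n digits digits [] = [] :=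
      pvB_stop n digits digits [] (by simp; omega)
    rw [hz, hz']
    simp [PySem.List.slice]
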